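-- pv_equiv track=rewrite | github.com/Kotomiya07/koten-text-refiner | src/koten_refiner/detector_evaluation.py | char_labels_from_tagged
-- ===== SOURCE A (Python) =====
-- OPEN_TAG = "<error>"
--
-- CLOSE_TAG = "</error>"
--
-- def char_labels_from_tagged(tagged_text: str) -> tuple[str, list[int]]:
--     plain_chars: list[str] = []
--     labels: list[int] = []
--     idx = 0
--     while idx < len(tagged_text):
--         if tagged_text.startswith(OPEN_TAG, idx):
--             open_start = idx
--             idx += len(OPEN_TAG)
--             close = tagged_text.find(CLOSE_TAG, idx)
--             if close == -1:
--                 # Fail closed on malformed output so evaluation can continue.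
--                 remainder = tagged_text[open_start:]
--                 plain_chars.extend(remainder)
--                 labels.extend([0] * len(remainder))
--                 break
--             segment = tagged_text[idx:close]
--             plain_chars.extend(segment)
--             labels.extend([1] * len(segment))
--             idx = close + len(CLOSE_TAG)
--             continue
--         plain_chars.append(tagged_text[idx])
--         labels.append(0)
--         idx += 1
--     return "".join(plain_chars), labels
-- ===== SOURCE B (Python) =====
-- OPEN_TAG = "<error>"
--
-- CLOSE_TAG = "</error>"
--
-- def char_labels_from_tagged(tagged_text: str) -> tuple[str, list[int]]:
--     plain_parts: list[str] = []
--     labels: list[int] = []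
--     idx = 0
--     n = len(tagged_text)
--     while idx < n:
--         nxt = tagged_text.find(OPEN_TAG, idx)
--         if nxt == -1:
--             chunk = tagged_text[idx:]
--             plain_parts.append(chunk)
--             labels.extend([0] * len(chunk))
--             break
--         chunk = tagged_text[idx:nxt]
--         plain_parts.append(chunk)
--         labels.extend([0] * len(chunk))
--         open_start = nxt
--         idx = nxt + len(OPEN_TAG)
--         close = tagged_text.find(CLOSE_TAG, idx)
--         if close == -1:
--             rest = tagged_text[open_start:]
--             plain_parts.append(rest)
--             labels.extend([0] * len(rest))
--             break
--         segment = tagged_text[idx:close]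
--         plain_parts.append(segment)
--         labels.extend([1] * len(segment))
--         idx = close + len(CLOSE_TAG)
--     return "".join(plain_parts), labels
-- ===== Notes on version B (the rewrite author's own statement) =====
-- stated objective: faster
-- what changed: Replaces A's char-by-char scan (startswith at every index, appending one character and one label at a time) with a chunk-based scan that uses str.find to locate the next tag and slices whole plain/tagged chunks at once.
import Mathlib
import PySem

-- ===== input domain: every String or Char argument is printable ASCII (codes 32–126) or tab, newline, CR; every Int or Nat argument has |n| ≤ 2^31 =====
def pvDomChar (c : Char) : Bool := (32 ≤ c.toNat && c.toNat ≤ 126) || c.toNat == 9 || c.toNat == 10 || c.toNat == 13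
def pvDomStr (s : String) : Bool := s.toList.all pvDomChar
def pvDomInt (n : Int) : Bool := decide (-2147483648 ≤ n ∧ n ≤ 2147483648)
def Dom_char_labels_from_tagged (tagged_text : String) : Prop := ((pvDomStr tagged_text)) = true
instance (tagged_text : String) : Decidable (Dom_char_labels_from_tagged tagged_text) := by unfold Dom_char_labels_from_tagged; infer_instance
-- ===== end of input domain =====

-- B rewrites A's char-by-char scan as a chunk-based scan (find the next tag, slice whole chunks); objective: faster (measured).

def pvOpenTag : List Char := ['<', 'e', 'r', 'r', 'o', 'r', '>']
def pvCloseTag : List Char := ['<', '/', 'e', 'r', 'r', 'o', 'r', '>']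

-- ===== PORT A =====
-- A's while loop over idx, as the structural recursion on the remaining suffix s = tagged_text[idx:]
-- (startswith(OPEN_TAG, idx) = pvOpenTag <+: s; find(CLOSE_TAG, idx) relative to the suffix).
def pvLoopA : List Char → List Char → List Int → List Char × List Int
  | [], plain, labels => (plain, labels)
  | c :: rest, plain, labels =>
    if pvOpenTag.isPrefixOf (c :: rest) then
      -- open_start = idx; idx += len(OPEN_TAG)
      let s' := (c :: rest).drop pvOpenTag.length
      let close := PySem.Chars.find s' pvCloseTag
      if close = -1 then
        -- fail closed: remainder = tagged_text[open_start:]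
        (plain ++ (c :: rest), labels ++ List.replicate (c :: rest).length 0)
      else
        let segment := s'.take close.toNat
        pvLoopA (s'.drop (close.toNat + pvCloseTag.length))
          (plain ++ segment) (labels ++ List.replicate segment.length 1)
    else
      pvLoopA rest (plain ++ [c]) (labels ++ [0])
  termination_by s _ _ => s.length
  decreasing_by
    · simp [pvOpenTag, pvCloseTag]
    · simp

def char_labels_from_tagged (tagged_text : String) : String × List Int :=
  let r := pvLoopA tagged_text.toList [] []
  (String.ofList r.1, r.2)

-- ===== PORT B =====
-- B's while loop, on the remaining suffix s = tagged_text[idx:]: find the next OPEN_TAG, copy the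
-- plain chunk before it wholesale, then find the CLOSE_TAG and copy the tagged segment wholesale.
def pvLoopB : List Char → List Char → List Int → List Char × List Int
  | [], plain, labels => (plain, labels)
  | c :: rest, plain, labels =>
    let nxt := PySem.Chars.find (c :: rest) pvOpenTag
    if nxt = -1 then
      (plain ++ (c :: rest), labels ++ List.replicate (c :: rest).length 0)
    else
      let chunk := (c :: rest).take nxt.toNat
      let s1 := (c :: rest).drop (nxt.toNat + pvOpenTag.length)
      let close := PySem.Chars.find s1 pvCloseTag
      if close = -1 then
        -- rest of the string from open_start on, label 0
        (plain ++ chunk ++ (c :: rest).drop nxt.toNat,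
         labels ++ List.replicate chunk.length 0 ++ List.replicate ((c :: rest).length - nxt.toNat) 0)
      else
        pvLoopB (s1.drop (close.toNat + pvCloseTag.length))
          (plain ++ chunk ++ s1.take close.toNat)
          (labels ++ List.replicate chunk.length 0 ++ List.replicate (s1.take close.toNat).length 1)
  termination_by s _ _ => s.length
  decreasing_by simp [pvOpenTag, pvCloseTag]

def char_labels_from_tagged_alt (tagged_text : String) : String × List Int :=
  let r := pvLoopB tagged_text.toList [] []
  (String.ofList r.1, r.2)

-- ===== PRECONDITION & SPEC =====
def Spec_char_labels_from_tagged (tagged_text : String) (out : String × List Int) : Prop := out = char_labels_from_tagged_alt tagged_text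
instance (tagged_text : String) (out : String × List Int) : Decidable (Spec_char_labels_from_tagged tagged_text out) := by unfold Spec_char_labels_from_tagged; infer_instance

-- ===== CLAIM (what is proved, stated in full; the proofs are below) =====
def Claim_equal_char_labels_from_tagged : Prop := ∀ (tagged_text : String), Dom_char_labels_from_tagged tagged_text → Spec_char_labels_from_tagged tagged_text (char_labels_from_tagged tagged_text)

-- ===== LEMMAS AND PROOFS =====

-- find points at j exactly when the pattern sits at j and nowhere earlier
theorem pv_find_eq_of_prefix_drop (s sub : List Char) (j : Nat)
    (hj : sub <+: s.drop j) (hmin : ∀ i, i < j → ¬ sub <+: s.drop i) :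
    PySem.Chars.find s sub = (j : Int) := by
  have hinf : sub <:+: s := hj.isInfix.trans (List.drop_suffix j s).isInfix
  have hnn : 0 ≤ PySem.Chars.find s sub := (PySem.Chars.find_nonneg_iff s sub).2 hinf
  obtain ⟨hpre, hmn⟩ := PySem.Chars.find_spec hnn
  have h1 : ¬ (PySem.Chars.find s sub).toNat < j := fun h => hmin _ h hpre
  have h2 : ¬ j < (PySem.Chars.find s sub).toNat := fun h => hmn j h hj
  omega

theorem pv_find_zero_of_prefix (s sub : List Char) (h : sub <+: s) :
    PySem.Chars.find s sub = 0 := by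
  have := pv_find_eq_of_prefix_drop s sub 0 (by simpa using h) (by omega)
  simpa using this

-- B takes one plain character when no open tag starts at the head
theorem pv_stepB (c : Char) (rest plain : List Char) (labels : List Int)
    (h : ¬ pvOpenTag <+: (c :: rest)) :
    pvLoopB (c :: rest) plain labels = pvLoopB rest (plain ++ [c]) (labels ++ [0]) := by
  by_cases hrest : pvOpenTag <:+: rest
  · -- the first occurrence in c :: rest is at position (find rest pvOpenTag) + 1
    have hnn : 0 ≤ PySem.Chars.find rest pvOpenTag := (PySem.Chars.find_nonneg_iff rest pvOpenTag).2 hrest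
    obtain ⟨hpre, hmn⟩ := PySem.Chars.find_spec hnn
    set j : Nat := (PySem.Chars.find rest pvOpenTag).toNat with hjdef
    have hj : PySem.Chars.find rest pvOpenTag = (j : Int) := by omega
    have hfind : PySem.Chars.find (c :: rest) pvOpenTag = ((j + 1 : Nat) : Int) := by
      apply pv_find_eq_of_prefix_drop
      · simpa using hpre
      · intro i hi
        match i with
        | 0 => simpa using h
        | i + 1 => simpa using hmn i (by omega)
    have hjle : j ≤ rest.length := by
      have := PySem.Chars.find_le_length rest pvOpenTag
      omega
    cases rest with
    | nil => exact absurd hrest (by simp [pvOpenTag])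
    | cons d rest' =>
      rw [pvLoopB.eq_2, pvLoopB.eq_2, hfind, hj]
      have hne : ¬ ((j + 1 : Nat) : Int) = -1 := by omega
      have hne' : ¬ ((j : Nat) : Int) = -1 := by omega
      have hdrop : List.drop (j + 1 + pvOpenTag.length) (c :: d :: rest')
          = List.drop (j + pvOpenTag.length) (d :: rest') := by
        rw [show j + 1 + pvOpenTag.length = (j + pvOpenTag.length) + 1 from by omega,
          List.drop_succ_cons]
      have hlen : (c :: d :: rest').length - (j + 1) = (d :: rest').length - j := by simp
      simp only [if_neg hne, if_neg hne', Int.toNat_natCast, hdrop, List.take_succ_cons,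
        List.drop_succ_cons, hlen]
      split
      · simp [List.replicate_succ, List.append_assoc, List.length_take]
      · simp [List.replicate_succ, List.append_assoc, List.length_take]
  · -- no occurrence at all
    have hninf : ¬ pvOpenTag <:+: (c :: rest) := by
      intro hin
      rcases List.infix_cons_iff.1 hin with hp | hi
      · exact h hp
      · exact hrest hi
    have h1 : PySem.Chars.find (c :: rest) pvOpenTag = -1 :=
      (PySem.Chars.find_eq_neg_one_iff _ _).2 hninf
    have h2 : PySem.Chars.find rest pvOpenTag = -1 :=
      (PySem.Chars.find_eq_neg_one_iff _ _).2 hrest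
    cases rest with
    | nil => rw [pvLoopB.eq_2, pvLoopB.eq_1, h1]; simp
    | cons d rest' =>
      rw [pvLoopB.eq_2, pvLoopB.eq_2, h1, h2]
      simp [List.replicate_succ, List.append_assoc]

theorem pv_loop_eq (n : Nat) : ∀ (s plain : List Char) (labels : List Int), s.length ≤ n →
    pvLoopA s plain labels = pvLoopB s plain labels := by
  induction n with
  | zero =>
    intro s plain labels hs
    have : s = [] := List.eq_nil_of_length_eq_zero (by omega)
    subst this; rw [pvLoopA.eq_1, pvLoopB.eq_1]
  | succ n ih =>
    intro s plain labels hs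
    cases s with
    | nil => rw [pvLoopA.eq_1, pvLoopB.eq_1]
    | cons c rest =>
      by_cases hp : pvOpenTag.isPrefixOf (c :: rest)
      · -- tag at the head: B's find returns 0 and both copy the same segment
        have hpre : pvOpenTag <+: (c :: rest) := List.isPrefixOf_iff_prefix.1 hp
        have hfind : PySem.Chars.find (c :: rest) pvOpenTag = 0 :=
          pv_find_zero_of_prefix _ _ hpre
        rw [pvLoopA.eq_2, pvLoopB.eq_2, hfind]
        simp only [if_pos hp, if_neg (by omega : ¬ (0 : Int) = -1), Int.toNat_zero,
          List.take_zero, Nat.zero_add, List.drop_zero, List.replicate_zero,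
          List.append_nil, List.length_nil, Nat.sub_zero]
        split
        · rfl
        · apply ih
          simp [pvOpenTag, pvCloseTag] at hs ⊢
          omega
      · have hnp : ¬ pvOpenTag <+: (c :: rest) := fun hh => hp (List.isPrefixOf_iff_prefix.2 hh)
        rw [pvLoopA.eq_2]
        simp only [if_neg hp]
        rw [ih rest (plain ++ [c]) (labels ++ [0]) (by simp at hs; omega)]
        exact (pv_stepB c rest plain labels hnp).symm

-- ===== VERDICT (by name: the statement is the Claim_ definition above) =====
theorem char_labels_from_tagged_spec : Claim_equal_char_labels_from_tagged := by
  intro t _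
  unfold Spec_char_labels_from_tagged char_labels_from_tagged char_labels_from_tagged_alt
  rw [pv_loop_eq t.toList.length t.toList [] [] le_rfl]
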